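-- pv_equiv track=rewrite | github.com/JohnOrc/my_project_with_aff3ct | examples/mc_decoder/src/generate_mc/mc_generate.py | leqNumEven
-- ===== SOURCE A (Python) =====
-- def leqNumEven(l_list, L):
--     ans = 0
--     # 2 bits
--     if len(l_list) >= 2:
--         for i0 in range(L):
--             for i1 in range(i0 + 1, L):
--                 if i0 <= l_list[-2] and i1 <= l_list[-1]:
--                     ans = ans + 1
--                     if ans > L:
--                         return ans
--     # 4 bits
--     if len(l_list) >= 4:
--         for i0 in range(L):
--             for i1 in range(i0 + 1, L):
--                 for i2 in range(i1 + 1, L):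
--                     for i3 in range(i2 + 1, L):
--                         if i0 <= l_list[-4] and i1 <= l_list[-3] and i2 <= l_list[-2] and i3 <= l_list[-1]:
--                             ans = ans + 1
--                             if ans > L:
--                                 return ans
--     # 6 bits
--     if len(l_list) >= 6:
--         for i0 in range(L):
--             for i1 in range(i0 + 1, L):
--                 for i2 in range(i1 + 1, L):
--                     for i3 in range(i2 + 1, L):
--                         for i4 in range(i3 + 1, L):
--                             for i5 in range(i4 + 1, L):
--                                 if i0 <= l_list[-6] and i1 <= l_list[-5] and i2 <= l_list[-4] and i3 <= l_list[-3] and i4 <= \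
--                                         l_list[-2] and i5 <= l_list[-1]:
--                                     ans = ans + 1
--                                     if ans > L:
--                                         return ans
--     return ans
-- ===== SOURCE B (Python) =====
-- def _count(bounds, L):
--     # number of tuples 0 <= i0 < i1 < ... < i_{k-1} < L with i_j <= bounds[j],
--     # by a suffix DP: cur[v] = number of such tuples (for the suffix of bounds
--     # processed so far) using only values >= v.
--     if L <= 0:
--         return 0
--     cur = [1] * (L + 1)
--     for b in reversed(bounds):
--         new = [0]
--         for v in reversed(range(L)):
--             new.append(new[-1] + (cur[v + 1] if v <= b else 0))
--         new.reverse()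
--         cur = new
--     return cur[0]
--
--
-- def leqNumEven(l_list, L):
--     total = 0
--     for k in (2, 4, 6):
--         if len(l_list) >= k:
--             total += _count(l_list[-k:], L)
--     return min(total, max(L + 1, 0))
-- ===== Notes on version B (the rewrite author's own statement) =====
-- stated objective: alternative
-- what changed: Replaces the 2/4/6-fold nested index loops with early exit by a per-block suffix dynamic program counting bounded strictly-increasing tuples, then caps the total at L+1 (A's worst case is O(L^6), the DP is O(L) per call, but A's early exit makes it fast on many inputs, so no blanket speed claim is made).
import Mathlib
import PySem

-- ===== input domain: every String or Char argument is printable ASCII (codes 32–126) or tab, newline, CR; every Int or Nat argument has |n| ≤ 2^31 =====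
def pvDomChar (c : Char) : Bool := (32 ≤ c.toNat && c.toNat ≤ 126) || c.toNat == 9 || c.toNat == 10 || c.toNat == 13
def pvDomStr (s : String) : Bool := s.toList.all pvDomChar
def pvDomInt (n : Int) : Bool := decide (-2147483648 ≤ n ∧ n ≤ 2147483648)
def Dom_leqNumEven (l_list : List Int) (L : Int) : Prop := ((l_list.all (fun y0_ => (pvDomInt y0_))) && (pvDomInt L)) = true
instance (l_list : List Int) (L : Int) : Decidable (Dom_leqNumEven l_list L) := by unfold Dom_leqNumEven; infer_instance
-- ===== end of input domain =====

-- B replaces A's 2/4/6-fold nested index loops (with early exit) by a per-block suffix dynamic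
-- program counting bounded strictly increasing tuples, capping the total at L+1 (alternative algorithm).


-- ===== PORT A =====
-- fold with early return (`return ans` inside the loops): `Sum.inl r` = already returned r
def pvFoldE (f : Int → Int → Sum Int Int) : List Int → Int → Sum Int Int
  | [], a => Sum.inr a
  | x :: xs, a =>
    match f a x with
    | Sum.inl r => Sum.inl r
    | Sum.inr a' => pvFoldE f xs a'

def leqNumEven (l_list : List Int) (L : Int) : Int :=
  -- 2 bits
  let r2 : Sum Int Int :=
    if 2 ≤ l_list.length then
      pvFoldE (fun a i0 =>
        pvFoldE (fun a i1 =>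
          if i0 ≤ PySem.List.pyGetD l_list (-2) 0 ∧ i1 ≤ PySem.List.pyGetD l_list (-1) 0 then
            (if a + 1 > L then Sum.inl (a + 1) else Sum.inr (a + 1))
          else Sum.inr a)
          (PySem.List.pyRange (i0 + 1) L) a)
        (PySem.List.pyRange 0 L) 0
    else Sum.inr 0
  match r2 with
  | Sum.inl r => r
  | Sum.inr ans2 =>
    -- 4 bits
    let r4 : Sum Int Int :=
      if 4 ≤ l_list.length then
        pvFoldE (fun a i0 =>
          pvFoldE (fun a i1 =>
            pvFoldE (fun a i2 =>
              pvFoldE (fun a i3 =>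
                if i0 ≤ PySem.List.pyGetD l_list (-4) 0 ∧ i1 ≤ PySem.List.pyGetD l_list (-3) 0 ∧
                    i2 ≤ PySem.List.pyGetD l_list (-2) 0 ∧ i3 ≤ PySem.List.pyGetD l_list (-1) 0 then
                  (if a + 1 > L then Sum.inl (a + 1) else Sum.inr (a + 1))
                else Sum.inr a)
                (PySem.List.pyRange (i2 + 1) L) a)
              (PySem.List.pyRange (i1 + 1) L) a)
            (PySem.List.pyRange (i0 + 1) L) a)
          (PySem.List.pyRange 0 L) ans2
      else Sum.inr ans2
    match r4 with
    | Sum.inl r => r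
    | Sum.inr ans4 =>
      -- 6 bits
      let r6 : Sum Int Int :=
        if 6 ≤ l_list.length then
          pvFoldE (fun a i0 =>
            pvFoldE (fun a i1 =>
              pvFoldE (fun a i2 =>
                pvFoldE (fun a i3 =>
                  pvFoldE (fun a i4 =>
                    pvFoldE (fun a i5 =>
                      if i0 ≤ PySem.List.pyGetD l_list (-6) 0 ∧ i1 ≤ PySem.List.pyGetD l_list (-5) 0 ∧
                          i2 ≤ PySem.List.pyGetD l_list (-4) 0 ∧ i3 ≤ PySem.List.pyGetD l_list (-3) 0 ∧
                          i4 ≤ PySem.List.pyGetD l_list (-2) 0 ∧ i5 ≤ PySem.List.pyGetD l_list (-1) 0 then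
                        (if a + 1 > L then Sum.inl (a + 1) else Sum.inr (a + 1))
                      else Sum.inr a)
                      (PySem.List.pyRange (i4 + 1) L) a)
                    (PySem.List.pyRange (i3 + 1) L) a)
                  (PySem.List.pyRange (i2 + 1) L) a)
                (PySem.List.pyRange (i1 + 1) L) a)
              (PySem.List.pyRange (i0 + 1) L) a)
            (PySem.List.pyRange 0 L) ans4
        else Sum.inr ans4
      match r6 with
      | Sum.inl r => r
      | Sum.inr ans6 => ans6

-- ===== PORT B =====
-- `_count(bounds, L)` of Source B: suffix DP, cur[v] = number of bounded increasing tuples using values >= v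
def pvCountDP (bounds : List Int) (L : Int) : Int :=
  if L ≤ 0 then 0
  else
    PySem.List.pyGetD
      (bounds.reverse.foldl
        (fun cur b =>
          ((PySem.List.pyRange 0 L).reverse.foldl
            (fun nw v => nw ++ [PySem.List.pyGetD nw (-1) 0 +
              (if v ≤ b then PySem.List.pyGetD cur (v + 1) 0 else 0)]) [0]).reverse)
        (List.replicate (L + 1).toNat 1))
      0 0

def leqNumEven_alt (l_list : List Int) (L : Int) : Int :=
  min
    (([2, 4, 6] : List Int).foldl
      (fun total k =>
        if k ≤ (l_list.length : Int) then
          total + pvCountDP (PySem.List.slice l_list (some (-k)) none) L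
        else total) 0)
    (max (L + 1) 0)

-- ===== PRECONDITION & SPEC =====
def Spec_leqNumEven (l_list : List Int) (L : Int) (out : Int) : Prop := out = leqNumEven_alt l_list L
instance (l_list : List Int) (L : Int) (out : Int) : Decidable (Spec_leqNumEven l_list L out) := by unfold Spec_leqNumEven; infer_instance

-- ===== CLAIM (what is proved, stated in full; the proofs are below) =====
def Claim_equal_leqNumEven : Prop := ∀ (l_list : List Int) (L : Int), Dom_leqNumEven l_list L → Spec_leqNumEven l_list L (leqNumEven l_list L)

-- ===== LEMMAS AND PROOFS =====

-- specification count: number of tuples lo ≤ i0 < i1 < … < L with i_j ≤ bs[j]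
def specN (L : Int) : List Int → Int → Int
  | [], _ => 1
  | b :: bs, lo =>
      ((PySem.List.pyRange lo L).map (fun i => if i ≤ b then specN L bs (i + 1) else 0)).sum

-- generic form of one of A's nested loop blocks: remaining bounds bs, accumulated condition C
def pvLoop (L : Int) : List Int → Int → Bool → Int → Sum Int Int
  | [], _, C, a =>
      if C then (if a + 1 > L then Sum.inl (a + 1) else Sum.inr (a + 1)) else Sum.inr a
  | b :: bs, lo, C, a =>
      pvFoldE (fun a i => pvLoop L bs (i + 1) (C && decide (i ≤ b)) a) (PySem.List.pyRange lo L) a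

theorem pyRange_nil (a b : Int) (h : b ≤ a) : PySem.List.pyRange a b = [] := by
  simp [PySem.List.pyRange]; omega

theorem specN_nonneg (L : Int) (bs : List Int) : ∀ (lo : Int), 0 ≤ specN L bs lo := by
  induction bs with
  | nil => intro lo; simp [specN]
  | cons b bs ih =>
      intro lo
      simp only [specN]
      apply List.sum_nonneg
      intro x hx
      obtain ⟨i, _, rfl⟩ := List.mem_map.1 hx
      split_ifs
      · exact ih _
      · exact le_refl 0

theorem foldE_congr {f g : Int → Int → Sum Int Int} {xs : List Int}
    (h : ∀ a x, f a x = g a x) : ∀ a, pvFoldE f xs a = pvFoldE g xs a := by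
  induction xs with
  | nil => intro a; rfl
  | cons x xs ih => intro a; simp only [pvFoldE, h]; cases g a x <;> simp [ih]

theorem foldE_spec (L : Int) (g : Int → Int) :
    ∀ (xs : List Int) (f : Int → Int → Sum Int Int),
      (∀ x ∈ xs, 0 ≤ g x) →
      (∀ a x, x ∈ xs → a ≤ L →
        f a x = if a + g x ≤ L then Sum.inr (a + g x) else Sum.inl (L + 1)) →
      ∀ a, a ≤ L →
        pvFoldE f xs a =
          if a + (xs.map g).sum ≤ L then Sum.inr (a + (xs.map g).sum) else Sum.inl (L + 1) := by
  intro xs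
  induction xs with
  | nil => intro f _ _ a ha; simp [pvFoldE, ha]
  | cons x xs ih =>
      intro f hg hf a ha
      have hgx : 0 ≤ g x := hg x (by simp)
      have hsum : 0 ≤ (xs.map g).sum := by
        apply List.sum_nonneg
        intro y hy
        obtain ⟨z, hz, rfl⟩ := List.mem_map.1 hy
        exact hg z (by simp [hz])
      simp only [pvFoldE]
      rw [hf a x (by simp) ha]
      by_cases h1 : a + g x ≤ L
      · rw [if_pos h1]
        simp only []
        rw [ih f (fun y hy => hg y (by simp [hy])) (fun b y hy hb => hf b y (by simp [hy]) hb) (a + g x) h1]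
        simp only [List.map_cons, List.sum_cons]
        rw [← add_assoc]
      · rw [if_neg h1]
        simp only [List.map_cons, List.sum_cons]
        rw [if_neg (by omega)]

theorem loop_clamp (L : Int) (bs : List Int) :
    ∀ (lo : Int) (C : Bool) (a : Int), a ≤ L →
      pvLoop L bs lo C a =
        (if a + (if C then specN L bs lo else 0) ≤ L
         then Sum.inr (a + (if C then specN L bs lo else 0))
         else Sum.inl (L + 1)) := by
  induction bs with
  | nil =>
      intro lo C a ha
      cases C
      · simp [pvLoop, ha]
      · simp only [pvLoop, if_true, specN]
        split_ifs <;> first | rfl | omega | (exact congrArg _ (by omega))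
  | cons b bs ih =>
      intro lo C a ha
      simp only [pvLoop]
      rw [foldE_spec L (fun i => if C then (if i ≤ b then specN L bs (i + 1) else 0) else 0)
          (PySem.List.pyRange lo L)
          (fun a i => pvLoop L bs (i + 1) (C && decide (i ≤ b)) a)
          ?hg ?hf a ha]
      case hg =>
        intro x _
        dsimp only
        split_ifs
        · exact specN_nonneg L bs _
        · exact le_refl 0
        · exact le_refl 0
      case hf =>
        intro a' i _ ha'
        dsimp only
        rw [ih (i + 1) (C && decide (i ≤ b)) a' ha']
        cases C <;> by_cases hib : i ≤ b <;> simp [hib]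
      have hsum : ((PySem.List.pyRange lo L).map
          (fun i => if C then (if i ≤ b then specN L bs (i + 1) else 0) else 0)).sum
          = if C then specN L (b :: bs) lo else 0 := by
        cases C
        · simp
        · simp [specN]
      rw [hsum]

-- the three blocks of A, rewritten as pvLoop and clamped
theorem block2_clamp (x0 x1 L a : Int) (ha : a ≤ L) :
    pvFoldE (fun a i0 =>
      pvFoldE (fun a i1 =>
        if i0 ≤ x0 ∧ i1 ≤ x1 then
          (if a + 1 > L then Sum.inl (a + 1) else Sum.inr (a + 1))
        else Sum.inr a)
        (PySem.List.pyRange (i0 + 1) L) a)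
      (PySem.List.pyRange 0 L) a =
    (if a + specN L [x0, x1] 0 ≤ L then Sum.inr (a + specN L [x0, x1] 0) else Sum.inl (L + 1)) := by
  have hb : pvFoldE (fun a i0 =>
      pvFoldE (fun a i1 =>
        if i0 ≤ x0 ∧ i1 ≤ x1 then
          (if a + 1 > L then Sum.inl (a + 1) else Sum.inr (a + 1))
        else Sum.inr a)
        (PySem.List.pyRange (i0 + 1) L) a)
      (PySem.List.pyRange 0 L) a = pvLoop L [x0, x1] 0 true a := by
    simp only [pvLoop]
    refine foldE_congr ?_ a
    intro a i0
    refine foldE_congr ?_ a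
    intro a i1
    by_cases h0 : i0 ≤ x0 <;> by_cases h1 : i1 ≤ x1 <;> simp [h0, h1]
  rw [hb, loop_clamp L [x0, x1] 0 true a ha]
  simp

theorem block4_clamp (x0 x1 x2 x3 L a : Int) (ha : a ≤ L) :
    pvFoldE (fun a i0 =>
      pvFoldE (fun a i1 =>
        pvFoldE (fun a i2 =>
          pvFoldE (fun a i3 =>
            if i0 ≤ x0 ∧ i1 ≤ x1 ∧ i2 ≤ x2 ∧ i3 ≤ x3 then
              (if a + 1 > L then Sum.inl (a + 1) else Sum.inr (a + 1))
            else Sum.inr a)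
            (PySem.List.pyRange (i2 + 1) L) a)
          (PySem.List.pyRange (i1 + 1) L) a)
        (PySem.List.pyRange (i0 + 1) L) a)
      (PySem.List.pyRange 0 L) a =
    (if a + specN L [x0, x1, x2, x3] 0 ≤ L then Sum.inr (a + specN L [x0, x1, x2, x3] 0)
     else Sum.inl (L + 1)) := by
  have hb : pvFoldE (fun a i0 =>
      pvFoldE (fun a i1 =>
        pvFoldE (fun a i2 =>
          pvFoldE (fun a i3 =>
            if i0 ≤ x0 ∧ i1 ≤ x1 ∧ i2 ≤ x2 ∧ i3 ≤ x3 then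
              (if a + 1 > L then Sum.inl (a + 1) else Sum.inr (a + 1))
            else Sum.inr a)
            (PySem.List.pyRange (i2 + 1) L) a)
          (PySem.List.pyRange (i1 + 1) L) a)
        (PySem.List.pyRange (i0 + 1) L) a)
      (PySem.List.pyRange 0 L) a = pvLoop L [x0, x1, x2, x3] 0 true a := by
    simp only [pvLoop]
    refine foldE_congr ?_ a
    intro a i0
    refine foldE_congr ?_ a
    intro a i1
    refine foldE_congr ?_ a
    intro a i2
    refine foldE_congr ?_ a
    intro a i3
    by_cases h0 : i0 ≤ x0 <;> by_cases h1 : i1 ≤ x1 <;> by_cases h2 : i2 ≤ x2 <;>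
      by_cases h3 : i3 ≤ x3 <;> simp [h0, h1, h2, h3]
  rw [hb, loop_clamp L [x0, x1, x2, x3] 0 true a ha]
  simp

theorem block6_clamp (x0 x1 x2 x3 x4 x5 L a : Int) (ha : a ≤ L) :
    pvFoldE (fun a i0 =>
      pvFoldE (fun a i1 =>
        pvFoldE (fun a i2 =>
          pvFoldE (fun a i3 =>
            pvFoldE (fun a i4 =>
              pvFoldE (fun a i5 =>
                if i0 ≤ x0 ∧ i1 ≤ x1 ∧ i2 ≤ x2 ∧ i3 ≤ x3 ∧ i4 ≤ x4 ∧ i5 ≤ x5 then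
                  (if a + 1 > L then Sum.inl (a + 1) else Sum.inr (a + 1))
                else Sum.inr a)
                (PySem.List.pyRange (i4 + 1) L) a)
              (PySem.List.pyRange (i3 + 1) L) a)
            (PySem.List.pyRange (i2 + 1) L) a)
          (PySem.List.pyRange (i1 + 1) L) a)
        (PySem.List.pyRange (i0 + 1) L) a)
      (PySem.List.pyRange 0 L) a =
    (if a + specN L [x0, x1, x2, x3, x4, x5] 0 ≤ L
     then Sum.inr (a + specN L [x0, x1, x2, x3, x4, x5] 0)
     else Sum.inl (L + 1)) := by
  have hb : pvFoldE (fun a i0 =>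
      pvFoldE (fun a i1 =>
        pvFoldE (fun a i2 =>
          pvFoldE (fun a i3 =>
            pvFoldE (fun a i4 =>
              pvFoldE (fun a i5 =>
                if i0 ≤ x0 ∧ i1 ≤ x1 ∧ i2 ≤ x2 ∧ i3 ≤ x3 ∧ i4 ≤ x4 ∧ i5 ≤ x5 then
                  (if a + 1 > L then Sum.inl (a + 1) else Sum.inr (a + 1))
                else Sum.inr a)
                (PySem.List.pyRange (i4 + 1) L) a)
              (PySem.List.pyRange (i3 + 1) L) a)
            (PySem.List.pyRange (i2 + 1) L) a)
          (PySem.List.pyRange (i1 + 1) L) a)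
        (PySem.List.pyRange (i0 + 1) L) a)
      (PySem.List.pyRange 0 L) a = pvLoop L [x0, x1, x2, x3, x4, x5] 0 true a := by
    simp only [pvLoop]
    refine foldE_congr ?_ a
    intro a i0
    refine foldE_congr ?_ a
    intro a i1
    refine foldE_congr ?_ a
    intro a i2
    refine foldE_congr ?_ a
    intro a i3
    refine foldE_congr ?_ a
    intro a i4
    refine foldE_congr ?_ a
    intro a i5
    by_cases h0 : i0 ≤ x0 <;> by_cases h1 : i1 ≤ x1 <;> by_cases h2 : i2 ≤ x2 <;>
      by_cases h3 : i3 ≤ x3 <;> by_cases h4 : i4 ≤ x4 <;> by_cases h5 : i5 ≤ x5 <;>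
      simp [h0, h1, h2, h3, h4, h5]
  rw [hb, loop_clamp L [x0, x1, x2, x3, x4, x5] 0 true a ha]
  simp

-- B side: the append-at-the-end loop is a scanl
theorem fold_append_last {α : Type} (g : α → Int) :
    ∀ (ps : List α) (acc : List Int) (a : Int),
      List.foldl (fun nw v => nw ++ [PySem.List.pyGetD nw (-1) 0 + g v]) (acc ++ [a]) ps
        = acc ++ List.scanl (fun t v => t + g v) a ps := by
  intro ps
  induction ps with
  | nil => intro acc a; simp
  | cons p ps ih =>
      intro acc a
      simp only [List.foldl_cons, List.scanl_cons]
      rw [PySem.List.pyGetD_neg_one_append_singleton]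
      have h2 : acc ++ [a] ++ [a + g p] = (acc ++ [a]) ++ [a + g p] := by simp
      rw [h2, ih (acc ++ [a]) (a + g p)]
      simp

theorem scanrev (g s : Nat → Int) :
    ∀ (n : Nat), (∀ v < n, s v = s (v + 1) + g v) →
      List.scanl (fun t v => t + g v) (s n) ((List.range n).reverse)
        = ((List.range (n + 1)).map s).reverse := by
  intro n
  induction n with
  | zero => intro _; simp
  | succ n ih =>
      intro h
      have hrev : (List.range (n + 1)).reverse = n :: (List.range n).reverse := by
        rw [List.range_succ]; simp
      rw [hrev, List.scanl_cons]
      have hs : s (n + 1) + g n = s n := (h n (by omega)).symm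
      rw [hs, ih (fun v hv => h v (by omega))]
      rw [List.range_succ (n := n + 1)]
      simp

theorem level_eq (L : Int) (n : Nat) (hn : L = (n : Int)) (b : Int) (suf : List Int) :
    ((PySem.List.pyRange 0 L).reverse.foldl
      (fun nw v => nw ++ [PySem.List.pyGetD nw (-1) 0 +
        (if v ≤ b then
          PySem.List.pyGetD ((List.range (n + 1)).map (fun (w : Nat) => specN L suf (w : Int))) (v + 1) 0
        else 0)]) [0]).reverse
      = (List.range (n + 1)).map (fun (w : Nat) => specN L (b :: suf) (w : Int)) := by
  subst hn
  rw [PySem.List.pyRange_zero_natCast, ← List.map_reverse, List.foldl_map]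
  have hcongr : List.foldl
      (fun (nw : List Int) (w : Nat) => nw ++ [PySem.List.pyGetD nw (-1) 0 +
        (if (w : Int) ≤ b then
          PySem.List.pyGetD ((List.range (n + 1)).map (fun (w : Nat) => specN (n : Int) suf (w : Int))) ((w : Int) + 1) 0
        else 0)]) [0] ((List.range n).reverse)
      = List.foldl
      (fun (nw : List Int) (w : Nat) => nw ++ [PySem.List.pyGetD nw (-1) 0 +
        (if (w : Int) ≤ b then specN (n : Int) suf ((w : Int) + 1) else 0)]) [0] ((List.range n).reverse) := by
    apply PySem.List.foldl_congr_mem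
    intro nw w hw
    have hwn : w < n := by simpa using hw
    have hidx : PySem.List.pyGetD ((List.range (n + 1)).map (fun (w : Nat) => specN (n : Int) suf (w : Int)))
        ((w : Int) + 1) 0 = specN (n : Int) suf ((w : Int) + 1) := by
      have h1 : ((w : Int) + 1) = (((w + 1 : Nat)) : Int) := by push_cast; ring
      rw [h1, PySem.List.pyGetD_natCast, PySem.List.getD_map_range _ _ _ _ (by omega)]
    rw [hidx]
  rw [hcongr]
  have h0 : List.foldl
      (fun (nw : List Int) (w : Nat) => nw ++ [PySem.List.pyGetD nw (-1) 0 +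
        (if (w : Int) ≤ b then specN (n : Int) suf ((w : Int) + 1) else 0)]) [0] ((List.range n).reverse)
      = [] ++ List.scanl (fun t (w : Nat) => t + (if (w : Int) ≤ b then specN (n : Int) suf ((w : Int) + 1) else 0)) 0 ((List.range n).reverse) := by
    exact fold_append_last _ ((List.range n).reverse) [] 0
  rw [h0]
  have hzero : specN (n : Int) (b :: suf) ((n : Nat) : Int) = 0 := by
    simp only [specN]
    rw [pyRange_nil _ _ (le_refl _)]
    simp
  have hs := scanrev (fun w : Nat => (if (w : Int) ≤ b then specN (n : Int) suf ((w : Int) + 1) else 0))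
      (fun w : Nat => specN (n : Int) (b :: suf) (w : Int)) n ?hrec
  · simp only [hzero] at hs
    rw [List.nil_append, hs]
    simp
  case hrec =>
    intro v hv
    simp only
    conv_lhs => rw [specN]
    rw [PySem.List.pyRange_one_cons (by exact_mod_cast hv)]
    simp only [List.map_cons, List.sum_cons]
    have : ((PySem.List.pyRange ((v : Int) + 1) (n : Int)).map
        (fun i => if i ≤ b then specN (n : Int) suf (i + 1) else 0)).sum
        = specN (n : Int) (b :: suf) (((v + 1 : Nat)) : Int) := by
      rw [specN]
      push_cast
      ring_nf
    rw [this]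
    push_cast
    ring

theorem outer_eq (L : Int) (n : Nat) (hn : L = (n : Int)) :
    ∀ (rb suf : List Int),
      List.foldl
        (fun cur b =>
          ((PySem.List.pyRange 0 L).reverse.foldl
            (fun nw v => nw ++ [PySem.List.pyGetD nw (-1) 0 +
              (if v ≤ b then PySem.List.pyGetD cur (v + 1) 0 else 0)]) [0]).reverse)
        ((List.range (n + 1)).map (fun (w : Nat) => specN L suf (w : Int))) rb
      = (List.range (n + 1)).map (fun (w : Nat) => specN L (rb.reverse ++ suf) (w : Int)) := by
  intro rb
  induction rb with
  | nil => intro suf; simp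
  | cons b rb ih =>
      intro suf
      rw [List.foldl_cons, level_eq L n hn b suf, ih (b :: suf)]
      simp

theorem pvCountDP_eq (bounds : List Int) (L : Int) (hb : bounds ≠ []) :
    pvCountDP bounds L = specN L bounds 0 := by
  obtain ⟨b, bs, rfl⟩ := List.exists_cons_of_ne_nil hb
  by_cases hL : L ≤ 0
  · simp only [pvCountDP, if_pos hL]
    simp [specN, pyRange_nil 0 L hL]
  · simp only [pvCountDP, if_neg hL]
    have hn : L = ((L.toNat : Nat) : Int) := by omega
    have hrepl : (List.replicate (L + 1).toNat 1 : List Int)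
        = (List.range (L.toNat + 1)).map (fun (w : Nat) => specN L [] (w : Int)) := by
      simp only [specN]
      rw [show (fun (w : Nat) => (1 : Int)) = Function.const Nat (1 : Int) from rfl, List.map_const]
      simp
      omega
    rw [hrepl, outer_eq L L.toNat hn (b :: bs).reverse []]
    simp only [List.reverse_reverse, List.append_nil]
    rw [PySem.List.pyGetD_zero]
    rw [List.getD_eq_getElem _ _ (by simp)]
    simp

-- the slices of B as the explicit bound lists of A
theorem drop2_eq (l : List Int) (h : 2 ≤ l.length) :
    l.drop (l.length - 2) = [PySem.List.pyGetD l (-2) 0, PySem.List.pyGetD l (-1) 0] := by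
  rw [PySem.List.pyGetD_neg_ofNat l 2 0 (by omega) (by omega),
      PySem.List.pyGetD_neg_ofNat l 1 0 (by omega) (by omega)]
  apply List.ext_getElem
  · simp; omega
  · intro i h1 h2
    rw [List.getElem_drop]
    have h2' : i < 2 := by simpa using h2
    interval_cases i <;> simp only [List.getElem_cons_succ, List.getElem_cons_zero] <;>
      (congr 1 <;> omega)

theorem drop4_eq (l : List Int) (h : 4 ≤ l.length) :
    l.drop (l.length - 4) =
      [PySem.List.pyGetD l (-4) 0, PySem.List.pyGetD l (-3) 0,
       PySem.List.pyGetD l (-2) 0, PySem.List.pyGetD l (-1) 0] := by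
  rw [PySem.List.pyGetD_neg_ofNat l 4 0 (by omega) (by omega),
      PySem.List.pyGetD_neg_ofNat l 3 0 (by omega) (by omega),
      PySem.List.pyGetD_neg_ofNat l 2 0 (by omega) (by omega),
      PySem.List.pyGetD_neg_ofNat l 1 0 (by omega) (by omega)]
  apply List.ext_getElem
  · simp; omega
  · intro i h1 h2
    rw [List.getElem_drop]
    have h2' : i < 4 := by simpa using h2
    interval_cases i <;> simp only [List.getElem_cons_succ, List.getElem_cons_zero] <;>
      (congr 1 <;> omega)

theorem drop6_eq (l : List Int) (h : 6 ≤ l.length) :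
    l.drop (l.length - 6) =
      [PySem.List.pyGetD l (-6) 0, PySem.List.pyGetD l (-5) 0,
       PySem.List.pyGetD l (-4) 0, PySem.List.pyGetD l (-3) 0,
       PySem.List.pyGetD l (-2) 0, PySem.List.pyGetD l (-1) 0] := by
  rw [PySem.List.pyGetD_neg_ofNat l 6 0 (by omega) (by omega),
      PySem.List.pyGetD_neg_ofNat l 5 0 (by omega) (by omega),
      PySem.List.pyGetD_neg_ofNat l 4 0 (by omega) (by omega),
      PySem.List.pyGetD_neg_ofNat l 3 0 (by omega) (by omega),
      PySem.List.pyGetD_neg_ofNat l 2 0 (by omega) (by omega),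
      PySem.List.pyGetD_neg_ofNat l 1 0 (by omega) (by omega)]
  apply List.ext_getElem
  · simp; omega
  · intro i h1 h2
    rw [List.getElem_drop]
    have h2' : i < 6 := by simpa using h2
    interval_cases i <;> simp only [List.getElem_cons_succ, List.getElem_cons_zero] <;>
      (congr 1 <;> omega)

-- ===== VERDICT (by name: the statement is the Claim_ definition above) =====
theorem leqNumEven_spec : Claim_equal_leqNumEven := by
  intro l L _
  unfold Spec_leqNumEven
  by_cases hL0 : L ≤ 0
  · have hA : leqNumEven l L = 0 := by
      simp [leqNumEven, pyRange_nil 0 L hL0, pvFoldE]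
    have hB : leqNumEven_alt l L = 0 := by
      simp only [leqNumEven_alt, List.foldl_cons, List.foldl_nil, pvCountDP, if_pos hL0]
      split_ifs <;> simp
    rw [hA, hB]
  · have h0L : (0 : Int) ≤ L := by omega
    have hmax : max (L + 1) 0 = L + 1 := by omega
    by_cases h2 : 2 ≤ l.length
    · by_cases h4 : 4 ≤ l.length
      · by_cases h6 : 6 ≤ l.length
        · -- all three blocks present
          have hB : leqNumEven_alt l L =
              min (specN L [PySem.List.pyGetD l (-2) 0, PySem.List.pyGetD l (-1) 0] 0 +
                   specN L [PySem.List.pyGetD l (-4) 0, PySem.List.pyGetD l (-3) 0,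
                            PySem.List.pyGetD l (-2) 0, PySem.List.pyGetD l (-1) 0] 0 +
                   specN L [PySem.List.pyGetD l (-6) 0, PySem.List.pyGetD l (-5) 0,
                            PySem.List.pyGetD l (-4) 0, PySem.List.pyGetD l (-3) 0,
                            PySem.List.pyGetD l (-2) 0, PySem.List.pyGetD l (-1) 0] 0) (L + 1) := by
            simp only [leqNumEven_alt, List.foldl_cons, List.foldl_nil]
            rw [PySem.List.slice_from_neg_ofNat l 2 (by norm_num),
                PySem.List.slice_from_neg_ofNat l 4 (by norm_num),
                PySem.List.slice_from_neg_ofNat l 6 (by norm_num)]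
            rw [drop2_eq l h2, drop4_eq l h4, drop6_eq l h6]
            rw [pvCountDP_eq _ _ (by simp), pvCountDP_eq _ _ (by simp),
                pvCountDP_eq _ _ (by simp)]
            have e2 : ((2:Int) ≤ (l.length : Int)) := by exact_mod_cast h2
            have e4 : ((4:Int) ≤ (l.length : Int)) := by exact_mod_cast h4
            have e6 : ((6:Int) ≤ (l.length : Int)) := by exact_mod_cast h6
            simp only [if_pos e2, if_pos e4, if_pos e6, hmax, zero_add]
          rw [hB]
          have n2 := specN_nonneg L [PySem.List.pyGetD l (-2) 0, PySem.List.pyGetD l (-1) 0] 0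
          have n4 := specN_nonneg L [PySem.List.pyGetD l (-4) 0, PySem.List.pyGetD l (-3) 0,
                            PySem.List.pyGetD l (-2) 0, PySem.List.pyGetD l (-1) 0] 0
          have n6 := specN_nonneg L [PySem.List.pyGetD l (-6) 0, PySem.List.pyGetD l (-5) 0,
                            PySem.List.pyGetD l (-4) 0, PySem.List.pyGetD l (-3) 0,
                            PySem.List.pyGetD l (-2) 0, PySem.List.pyGetD l (-1) 0] 0
          simp only [leqNumEven, if_pos h2, block2_clamp _ _ L 0 h0L, zero_add]
          by_cases c2 : specN L [PySem.List.pyGetD l (-2) 0, PySem.List.pyGetD l (-1) 0] 0 ≤ L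
          · rw [if_pos c2]
            dsimp only
            rw [if_pos h4, block4_clamp _ _ _ _ L _ c2]
            by_cases c4 : specN L [PySem.List.pyGetD l (-2) 0, PySem.List.pyGetD l (-1) 0] 0 +
                specN L [PySem.List.pyGetD l (-4) 0, PySem.List.pyGetD l (-3) 0,
                         PySem.List.pyGetD l (-2) 0, PySem.List.pyGetD l (-1) 0] 0 ≤ L
            · rw [if_pos c4]
              dsimp only
              rw [if_pos h6, block6_clamp _ _ _ _ _ _ L _ c4]
              by_cases c6 : specN L [PySem.List.pyGetD l (-2) 0, PySem.List.pyGetD l (-1) 0] 0 +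
                  specN L [PySem.List.pyGetD l (-4) 0, PySem.List.pyGetD l (-3) 0,
                           PySem.List.pyGetD l (-2) 0, PySem.List.pyGetD l (-1) 0] 0 +
                  specN L [PySem.List.pyGetD l (-6) 0, PySem.List.pyGetD l (-5) 0,
                           PySem.List.pyGetD l (-4) 0, PySem.List.pyGetD l (-3) 0,
                           PySem.List.pyGetD l (-2) 0, PySem.List.pyGetD l (-1) 0] 0 ≤ L
              · rw [if_pos c6]
                dsimp only
                omega
              · rw [if_neg c6]
                dsimp only
                omega
            · rw [if_neg c4]
              dsimp only
              omega
          · rw [if_neg c2]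
            dsimp only
            omega
        · -- blocks 2 and 4 only
          have hB : leqNumEven_alt l L =
              min (specN L [PySem.List.pyGetD l (-2) 0, PySem.List.pyGetD l (-1) 0] 0 +
                   specN L [PySem.List.pyGetD l (-4) 0, PySem.List.pyGetD l (-3) 0,
                            PySem.List.pyGetD l (-2) 0, PySem.List.pyGetD l (-1) 0] 0) (L + 1) := by
            simp only [leqNumEven_alt, List.foldl_cons, List.foldl_nil]
            rw [PySem.List.slice_from_neg_ofNat l 2 (by norm_num),
                PySem.List.slice_from_neg_ofNat l 4 (by norm_num)]
            rw [drop2_eq l h2, drop4_eq l h4]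
            rw [pvCountDP_eq _ _ (by simp), pvCountDP_eq _ _ (by simp)]
            have e2 : ((2:Int) ≤ (l.length : Int)) := by exact_mod_cast h2
            have e4 : ((4:Int) ≤ (l.length : Int)) := by exact_mod_cast h4
            have e6 : ¬ ((6:Int) ≤ (l.length : Int)) := by exact_mod_cast h6
            simp only [if_pos e2, if_pos e4, if_neg e6, hmax, zero_add]
          rw [hB]
          have n2 := specN_nonneg L [PySem.List.pyGetD l (-2) 0, PySem.List.pyGetD l (-1) 0] 0
          have n4 := specN_nonneg L [PySem.List.pyGetD l (-4) 0, PySem.List.pyGetD l (-3) 0,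
                            PySem.List.pyGetD l (-2) 0, PySem.List.pyGetD l (-1) 0] 0
          simp only [leqNumEven, if_pos h2, block2_clamp _ _ L 0 h0L, zero_add]
          by_cases c2 : specN L [PySem.List.pyGetD l (-2) 0, PySem.List.pyGetD l (-1) 0] 0 ≤ L
          · rw [if_pos c2]
            dsimp only
            rw [if_pos h4, block4_clamp _ _ _ _ L _ c2]
            by_cases c4 : specN L [PySem.List.pyGetD l (-2) 0, PySem.List.pyGetD l (-1) 0] 0 +
                specN L [PySem.List.pyGetD l (-4) 0, PySem.List.pyGetD l (-3) 0,
                         PySem.List.pyGetD l (-2) 0, PySem.List.pyGetD l (-1) 0] 0 ≤ L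
            · rw [if_pos c4]
              dsimp only
              rw [if_neg h6]
              dsimp only
              omega
            · rw [if_neg c4]
              dsimp only
              omega
          · rw [if_neg c2]
            dsimp only
            omega
      · -- block 2 only
        have h6 : ¬ 6 ≤ l.length := by omega
        have hB : leqNumEven_alt l L =
            min (specN L [PySem.List.pyGetD l (-2) 0, PySem.List.pyGetD l (-1) 0] 0) (L + 1) := by
          simp only [leqNumEven_alt, List.foldl_cons, List.foldl_nil]
          rw [PySem.List.slice_from_neg_ofNat l 2 (by norm_num)]
          rw [drop2_eq l h2]
          rw [pvCountDP_eq _ _ (by simp)]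
          have e2 : ((2:Int) ≤ (l.length : Int)) := by exact_mod_cast h2
          have e4 : ¬ ((4:Int) ≤ (l.length : Int)) := by exact_mod_cast h4
          have e6 : ¬ ((6:Int) ≤ (l.length : Int)) := by exact_mod_cast h6
          simp only [if_pos e2, if_neg e4, if_neg e6, hmax, zero_add]
        rw [hB]
        have n2 := specN_nonneg L [PySem.List.pyGetD l (-2) 0, PySem.List.pyGetD l (-1) 0] 0
        simp only [leqNumEven, if_pos h2, block2_clamp _ _ L 0 h0L, zero_add]
        by_cases c2 : specN L [PySem.List.pyGetD l (-2) 0, PySem.List.pyGetD l (-1) 0] 0 ≤ L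
        · rw [if_pos c2]
          dsimp only
          rw [if_neg h4]
          dsimp only
          rw [if_neg h6]
          dsimp only
          omega
        · rw [if_neg c2]
          dsimp only
          omega
    · -- no block at all
      have h4 : ¬ 4 ≤ l.length := by omega
      have h6 : ¬ 6 ≤ l.length := by omega
      have hA : leqNumEven l L = 0 := by
        simp only [leqNumEven, if_neg h2, if_neg h4, if_neg h6]
      have hB : leqNumEven_alt l L = 0 := by
        simp only [leqNumEven_alt, List.foldl_cons, List.foldl_nil]
        have e2 : ¬ ((2:Int) ≤ (l.length : Int)) := by exact_mod_cast h2
        have e4 : ¬ ((4:Int) ≤ (l.length : Int)) := by exact_mod_cast h4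
        have e6 : ¬ ((6:Int) ≤ (l.length : Int)) := by exact_mod_cast h6
        simp only [if_neg e2, if_neg e4, if_neg e6, hmax]
        omega
      rw [hA, hB]
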